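-- pv_equiv track=rewrite | github.com/kordex0/ProjectEuler | python/problem023.py | divisorsSum
-- ===== SOURCE A (Python) =====
-- def divisorsSum(factors):
--     if len(factors) == 0:
--         return 1
--     base = factors[0]
--     i = 1
--     while i < len(factors) and factors[i] == base:
--         i += 1
--     partialSum = divisorsSum(factors[i:])
--     fullSum = partialSum
--     for power in range(i):
--         fullSum *= base
--         fullSum += partialSum
--     return fullSum
-- ===== SOURCE B (Python) =====
-- def divisorsSum(factors):
--     # One iterative pass over the list: for each run of equal adjacent values,
--     # accumulate the geometric factor 1 + p + p^2 + ... + p^run and multiply.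
--     result = 1
--     j = 0
--     n = len(factors)
--     while j < n:
--         base = factors[j]
--         term = 1
--         pw = 1
--         while j < n and factors[j] == base:
--             pw *= base
--             term += pw
--             j += 1
--         result *= term
--     return result
-- ===== Notes on version B (the rewrite author's own statement) =====
-- stated objective: alternative
-- what changed: Replaces A's recursion with list slicing per run by a single iterative pass that multiplies an incrementally built geometric factor per run of equal adjacent values, no slicing and no recursion.
import Mathlib
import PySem

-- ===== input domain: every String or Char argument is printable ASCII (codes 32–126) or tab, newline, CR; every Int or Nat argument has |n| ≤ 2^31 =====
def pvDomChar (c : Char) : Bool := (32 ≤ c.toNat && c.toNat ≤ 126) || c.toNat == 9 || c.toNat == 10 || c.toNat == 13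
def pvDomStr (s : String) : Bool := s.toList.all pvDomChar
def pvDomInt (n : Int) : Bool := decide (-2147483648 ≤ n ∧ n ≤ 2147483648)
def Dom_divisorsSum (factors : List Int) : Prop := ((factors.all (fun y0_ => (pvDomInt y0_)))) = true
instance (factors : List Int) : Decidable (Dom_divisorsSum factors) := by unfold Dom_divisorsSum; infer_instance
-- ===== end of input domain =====

-- B replaces A's per-run recursion with list slicing by one iterative pass multiplying
-- per-run geometric factors (alternative decomposition; both total, return values proved equal).

-- ===== PORT A =====

-- A's while loop 'i = 1; while i < len and factors[i] == base: i += 1' counted from the tail: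
-- runLenA base rest = i - 1.
def runLenA (base : Int) : List Int → Nat
  | [] => 0
  | x :: xs => if x == base then 1 + runLenA base xs else 0

theorem runLenA_le (base : Int) : ∀ l : List Int, runLenA base l ≤ l.length
  | [] => by simp [runLenA]
  | x :: xs => by
    simp only [runLenA, List.length_cons]
    split
    · have := runLenA_le base xs; omega
    · omega

-- Literal port of A: factors[i:] (0 ≤ i ≤ len) is List.drop i; the for-loop over range(i)
-- is a foldl over List.range i with the same state updates.
def divisorsSum (factors : List Int) : Int :=
  match factors with
  | [] => 1
  | base :: rest =>
    let i := 1 + runLenA base rest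
    let partialSum := divisorsSum ((base :: rest).drop i)
    (List.range i).foldl (fun fullSum _ => fullSum * base + partialSum) partialSum
termination_by factors.length
decreasing_by
  have := runLenA_le base rest
  simp only [List.length_drop, List.length_cons]
  omega

-- ===== PORT B =====

-- inner while loop of Source B: consumes the leading run of elements equal to base,
-- state (term, pw); returns final term and the unconsumed suffix.
def altInner (base : Int) : List Int → Int → Int → Int × List Int
  | [], term, _ => (term, [])
  | x :: xs, term, pw =>
    if x == base then altInner base xs (term + pw * base) (pw * base)
    else (term, x :: xs)

theorem altInner_len (base : Int) : ∀ (l : List Int) (t p : Int),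
    (altInner base l t p).2.length ≤ l.length
  | [], _, _ => by simp [altInner]
  | x :: xs, t, p => by
    simp only [altInner]
    split
    · have := altInner_len base xs (t + p * base) (p * base); simp; omega
    · simp

-- outer while loop of Source B, state result.
def altGo (factors : List Int) (result : Int) : Int :=
  match factors with
  | [] => result
  | base :: rest =>
    let r := altInner base (base :: rest) 1 1
    altGo r.2 (result * r.1)
termination_by factors.length
decreasing_by
  simp only [altInner, beq_self_eq_true, if_true]
  have := altInner_len base rest (1 + 1 * base) (1 * base)
  simp only [List.length_cons]
  omega

def divisorsSum_alt (factors : List Int) : Int := altGo factors 1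

-- ===== PRECONDITION & SPEC =====
def Spec_divisorsSum (factors : List Int) (out : Int) : Prop := out = divisorsSum_alt factors
instance (factors : List Int) (out : Int) : Decidable (Spec_divisorsSum factors out) := by unfold Spec_divisorsSum; infer_instance

-- ===== CLAIM (what is proved, stated in full; the proofs are below) =====
def Claim_equal_divisorsSum : Prop := ∀ (factors : List Int), Dom_divisorsSum factors → Spec_divisorsSum factors (divisorsSum factors)

-- ===== LEMMAS AND PROOFS =====

-- geometric sum matching A's fold: gsum b n satisfies gsum 0 = 1, gsum (n+1) = gsum n * b + 1.
def gsum (b : Int) : Nat → Int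
  | 0 => 1
  | n + 1 => gsum b n * b + 1

theorem foldA_eq (b p : Int) : ∀ n : Nat,
    (List.range n).foldl (fun s _ => s * b + p) p = p * gsum b n
  | 0 => by simp [gsum]
  | n + 1 => by
    rw [List.range_succ, List.foldl_append, foldA_eq b p n]
    simp [gsum]; ring

-- altInner on a list whose leading run (w.r.t. base) has length k = runLenA base l.
def hsum (b : Int) : Nat → Int
  | 0 => 0
  | k + 1 => b + b * hsum b k

theorem altInner_spec (base : Int) : ∀ (l : List Int) (t p : Int),
    altInner base l t p = (t + p * hsum base (runLenA base l), l.drop (runLenA base l))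
  | [], t, p => by simp [altInner, runLenA, hsum]
  | x :: xs, t, p => by
    simp only [altInner, runLenA]
    by_cases h : x = base
    · simp only [h, beq_self_eq_true, if_true, altInner_spec base xs]
      rw [Nat.add_comm 1 (runLenA base xs)]
      simp only [hsum, List.drop_succ_cons, Prod.mk.injEq]
      exact ⟨by ring, trivial⟩
    · simp [h, hsum]

theorem hsum_gsum (b : Int) : ∀ k : Nat, 1 + b * (1 + hsum b k) = gsum b (k + 1)
  | 0 => by simp [hsum, gsum]; ring
  | k + 1 => by
    have ih := hsum_gsum b k
    simp only [hsum, gsum] at *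
    linear_combination b * ih

theorem altGo_pull (l : List Int) (r : Int) : ∀ s : Int, altGo l (s * r) = s * altGo l r := by
  induction l, r using altGo.induct with
  | case1 r => intro s; simp [altGo]
  | case2 v1 v2 v3 v4 v5 =>
    intro s
    rw [altGo]
    conv_rhs => rw [altGo]
    rw [mul_assoc]
    exact v5 s

theorem altGo_mul (l : List Int) (r : Int) : altGo l r = r * altGo l 1 := by
  have := altGo_pull l 1 r
  simpa using this

theorem main_eq (factors : List Int) : divisorsSum factors = divisorsSum_alt factors := by
  induction factors using divisorsSum.induct with
  | case1 => rw [divisorsSum.eq_def]; simp [divisorsSum_alt, altGo]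
  | case2 w1 w2 w3 w4 =>
    rw [divisorsSum.eq_def]
    simp only [foldA_eq]
    have w4' : divisorsSum (List.drop (1 + runLenA w1 w2) (w1 :: w2))
        = divisorsSum_alt (List.drop (1 + runLenA w1 w2) (w1 :: w2)) := w4
    rw [Nat.add_comm 1 (runLenA w1 w2)] at w4' ⊢
    simp only [List.drop_succ_cons] at w4' ⊢
    rw [w4']
    unfold divisorsSum_alt
    conv_rhs => rw [altGo]
    simp only [altInner, beq_self_eq_true, if_true, altInner_spec]
    have h := hsum_gsum w1 (runLenA w1 w2)
    rw [← h]
    rw [altGo_mul (List.drop (runLenA w1 w2) w2)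
        (1 * (1 + 1 * w1 + 1 * w1 * hsum w1 (runLenA w1 w2)))]
    ring

-- ===== VERDICT (by name: the statement is the Claim_ definition above) =====
theorem divisorsSum_spec : Claim_equal_divisorsSum := by
  intro factors _
  unfold Spec_divisorsSum
  exact main_eq factors
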